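-- pv_equiv track=rewrite | github.com/genisplaja/cunet | cunet/preprocess/spectrogram.py | get_activations
-- ===== SOURCE A (Python) =====
-- def get_activations(pitch_track):
--     silent_zone_on = True
--     start_times = []
--     end_times = []
--     for idx, value in enumerate(pitch_track):
--         if value == 0:
--             if not silent_zone_on:
--                 end_times.append(idx-1)
--                 silent_zone_on = True
--         else:
--             if silent_zone_on:
--                 start_times.append(idx)
--                 silent_zone_on = False
--
--     return start_times, end_times
-- ===== SOURCE B (Python) =====
-- def get_activations(pitch_track):
--     # Stateless edge detection: pair each sample with its predecessor (0 before
--     # the first sample) and pick rising edges as starts, falling edges as ends.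
--     pairs = list(enumerate(zip([0] + pitch_track, pitch_track)))
--     start_times = [i for i, (p, v) in pairs if v != 0 and p == 0]
--     end_times = [i - 1 for i, (p, v) in pairs if v == 0 and p != 0]
--     return start_times, end_times
-- ===== Notes on version B (the rewrite author's own statement) =====
-- stated objective: alternative
-- what changed: Replaces the stateful scan with a silent-zone flag by stateless edge detection over (previous, current) pairs: starts are rising edges (prev==0, cur!=0), ends are falling edges (prev!=0, cur==0) at index i-1.
import Mathlib
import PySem

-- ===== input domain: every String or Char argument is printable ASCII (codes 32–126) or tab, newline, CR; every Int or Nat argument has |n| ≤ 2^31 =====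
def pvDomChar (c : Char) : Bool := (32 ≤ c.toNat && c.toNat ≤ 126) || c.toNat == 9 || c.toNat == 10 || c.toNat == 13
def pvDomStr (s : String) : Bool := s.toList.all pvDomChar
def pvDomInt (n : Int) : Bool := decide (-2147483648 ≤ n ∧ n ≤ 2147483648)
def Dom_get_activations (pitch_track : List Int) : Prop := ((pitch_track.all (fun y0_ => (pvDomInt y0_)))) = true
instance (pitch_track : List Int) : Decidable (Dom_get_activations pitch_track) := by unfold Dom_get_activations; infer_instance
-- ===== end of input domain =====

-- B replaces A's stateful silent-zone-flag scan by stateless edge detection over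
-- (previous, current) pairs (objective: alternative decomposition, same O(n) cost).


-- ===== PORT A =====
-- state: (silent_zone_on, start_times, end_times)
def getActStep (s : Bool × List Int × List Int) (iv : Int × Int) : Bool × List Int × List Int :=
  let (silent, starts, ends) := s
  let (idx, value) := iv
  if value = 0 then
    if silent = false then (true, starts, ends ++ [idx - 1]) else s
  else
    if silent = true then (false, starts ++ [idx], ends) else s

def get_activations (pitch_track : List Int) : List Int × List Int :=
  let st := (PySem.List.enumerate pitch_track 0).foldl getActStep (true, [], [])
  (st.2.1, st.2.2)

-- ===== PORT B =====
def get_activations_alt (pitch_track : List Int) : List Int × List Int :=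
  let pairs := PySem.List.enumerate ((0 :: pitch_track).zip pitch_track) 0
  (pairs.filterMap (fun q => if q.2.2 ≠ 0 ∧ q.2.1 = 0 then some q.1 else none),
   pairs.filterMap (fun q => if q.2.2 = 0 ∧ q.2.1 ≠ 0 then some (q.1 - 1) else none))

-- ===== PRECONDITION & SPEC =====
def Spec_get_activations (pitch_track : List Int) (out : List Int × List Int) : Prop := out = get_activations_alt pitch_track
instance (pitch_track : List Int) (out : List Int × List Int) : Decidable (Spec_get_activations pitch_track out) := by unfold Spec_get_activations; infer_instance

-- ===== CLAIM (what is proved, stated in full; the proofs are below) =====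
def Claim_equal_get_activations : Prop := ∀ (pitch_track : List Int), Dom_get_activations pitch_track → Spec_get_activations pitch_track (get_activations pitch_track)

-- ===== LEMMAS AND PROOFS =====

-- bridge: the default of getLastD shifts under cons
theorem pvLastD_cons (l : List Int) (a prev : Int) :
    ((a :: l).getLast?.getD prev) = l.getLast?.getD a := by
  cases l with
  | nil => simp
  | cons b t =>
    obtain ⟨x, hx⟩ := Option.isSome_iff_exists.mp
      (List.getLast?_isSome.mpr (by simp : (b :: t) ≠ []))
    simp [List.getLast?_cons_cons, hx]

-- the generalized invariant: folding A's step from state ((prev = 0), S, E) over the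
-- enumerated tail equals appending B's edge lists for the pair list (prev :: l).zip l.
theorem getAct_invariant (l : List Int) : ∀ (n prev : Int) (S E : List Int),
    (PySem.List.enumerate l n).foldl getActStep (decide (prev = 0), S, E) =
      (decide (l.getLastD prev = 0),
       S ++ (PySem.List.enumerate ((prev :: l).zip l) n).filterMap
              (fun q => if q.2.2 ≠ 0 ∧ q.2.1 = 0 then some q.1 else none),
       E ++ (PySem.List.enumerate ((prev :: l).zip l) n).filterMap
              (fun q => if q.2.2 = 0 ∧ q.2.1 ≠ 0 then some (q.1 - 1) else none)) := by
  induction l with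
  | nil => intro n prev S E; simp [PySem.List.enumerate_nil]
  | cons a l ih =>
    intro n prev S E
    have hz : (prev :: a :: l).zip (a :: l) = (prev, a) :: ((a :: l).zip l) := rfl
    rw [hz, PySem.List.enumerate_cons, PySem.List.enumerate_cons, List.foldl_cons]
    by_cases ha : a = 0 <;> by_cases hp : prev = 0
    · have hstep : getActStep (decide (prev = 0), S, E) (n, a) = (decide (a = 0), S, E) := by
        simp [getActStep, ha, hp]
      rw [hstep, ih (n + 1) a S E]
      simp [ha, hp, pvLastD_cons]
    · have hstep : getActStep (decide (prev = 0), S, E) (n, a)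
          = (decide (a = 0), S, E ++ [n - 1]) := by
        simp [getActStep, ha, hp]
      rw [hstep, ih (n + 1) a S (E ++ [n - 1])]
      simp [ha, hp, pvLastD_cons]
    · have hstep : getActStep (decide (prev = 0), S, E) (n, a)
          = (decide (a = 0), S ++ [n], E) := by
        simp [getActStep, ha, hp]
      rw [hstep, ih (n + 1) a (S ++ [n]) E]
      simp [ha, hp, pvLastD_cons]
    · have hstep : getActStep (decide (prev = 0), S, E) (n, a) = (decide (a = 0), S, E) := by
        simp [getActStep, ha, hp]
      rw [hstep, ih (n + 1) a S E]
      simp [ha, hp, pvLastD_cons]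

-- ===== VERDICT (by name: the statement is the Claim_ definition above) =====
theorem get_activations_spec : Claim_equal_get_activations := by
  intro pt _
  unfold Spec_get_activations get_activations get_activations_alt
  have h := getAct_invariant pt 0 0 [] []
  simp at h
  simp [h]
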